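-- pv_equiv track=rewrite | github.com/Varshithatangeti/DSA-Python | Sortings/SortingSentence.py | sorting_sentence
-- ===== SOURCE A (Python) =====
-- def sorting_sentence(s):
--     s=s.split()
--     keys=[]
--     values=[]
--     for word in s:
--         for i in range(len(word)):
--             if word[i].isdigit():
--                 keys.append(int(word[i]))
--                 values.append(word[:i]+word[i+1:])
--     combined=sorted(zip(keys,values))
--     result=[]
--     for pair in combined:
--         result.append(pair[1])
--     result=" ".join(result)
--     return result
-- ===== SOURCE B (Python) =====
-- def sorting_sentence(s):
--     # Bucket sort on the bounded digit keys 0..9 instead of one comparison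
--     # sort on (key, value) tuples.
--     buckets = [[] for _ in range(10)]
--     for word in s.split():
--         for i in range(len(word)):
--             ch = word[i]
--             if ch.isdigit():
--                 buckets[int(ch)].append(word[:i] + word[i + 1:])
--     parts = []
--     for b in buckets:
--         parts += sorted(b)
--     return " ".join(parts)
-- ===== Notes on version B (the rewrite author's own statement) =====
-- stated objective: alternative
-- what changed: B replaces A's single comparison sort over (digit, de-digited-word) tuples by a counting/bucket sort: words are distributed into ten digit buckets, each bucket is sorted lexicographically, and buckets are concatenated in digit order 0..9.
import Mathlib
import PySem

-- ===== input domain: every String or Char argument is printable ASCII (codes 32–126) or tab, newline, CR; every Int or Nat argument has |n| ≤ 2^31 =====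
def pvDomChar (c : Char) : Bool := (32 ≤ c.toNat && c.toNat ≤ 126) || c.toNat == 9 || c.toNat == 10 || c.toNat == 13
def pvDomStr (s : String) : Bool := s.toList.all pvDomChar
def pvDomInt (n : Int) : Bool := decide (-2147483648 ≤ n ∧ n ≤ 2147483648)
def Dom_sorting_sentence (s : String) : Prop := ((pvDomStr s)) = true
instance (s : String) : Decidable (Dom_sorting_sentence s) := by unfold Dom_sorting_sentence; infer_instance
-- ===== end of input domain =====

-- B replaces A's single comparison sort on (digit, word) tuples by ten digit buckets,
-- each sorted lexicographically and concatenated in digit order (objective: alternative).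


-- ===== PORT A =====
-- inner-loop body of A: 'if word[i].isdigit(): keys.append(int(word[i])); values.append(word[:i]+word[i+1:])'
-- (int(c) for a digit char c is exactly its code minus 48; word[i] is always in range, the none branch is unreachable)
def pvA_step (w : List Char) (acc : List Int × List (List Char)) (i : Int) : List Int × List (List Char) :=
  match PySem.List.pyGet? w i with
  | some c =>
    if PySem.Chars.isdigit c then
      (acc.1 ++ [((c.toNat : Int) - 48)],
       acc.2 ++ [PySem.Chars.slice w none (some i) ++ PySem.Chars.slice w (some (i + 1)) none])
    else acc
  | none => acc

def sorting_sentence (s : String) : String :=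
  let words := PySem.Str.split₀ s
  let kv := words.foldl
    (fun acc word =>
      (PySem.List.pyRange 0 ((word.toList.length : Nat) : Int) 1).foldl (pvA_step word.toList) acc)
    ([], [])
  let combined := PySem.List.sorted2 (kv.1.zip kv.2) (fun p => p.1) (fun p => p.2) false
  let result := combined.foldl (fun acc pair => acc ++ [pair.2]) []
  String.ofList (PySem.Chars.join [' '] result)

-- ===== PORT B =====
-- inner-loop body of B: 'if ch.isdigit(): buckets[int(ch)].append(word[:i]+word[i+1:])'
-- (i ≥ 0 always, so word[:i] = take i.toNat and word[i+1:] = drop (i.toNat+1) are exact)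
def pvB_step (w : List Char) (bk : List (List (List Char))) (i : Int) : List (List (List Char)) :=
  match PySem.List.pyGet? w i with
  | some c =>
    if PySem.Chars.isdigit c then
      bk.set (c.toNat - 48) (bk.getD (c.toNat - 48) [] ++ [w.take i.toNat ++ w.drop (i.toNat + 1)])
    else bk
  | none => bk

def sorting_sentence_alt (s : String) : String :=
  let buckets := (PySem.Str.split₀ s).foldl
    (fun bk word =>
      (PySem.List.pyRange 0 ((word.toList.length : Nat) : Int) 1).foldl (pvB_step word.toList) bk)
    (List.replicate 10 [])
  String.ofList (PySem.Chars.join [' ']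
    ((buckets.map (fun b => PySem.List.sorted b (fun v => v) false)).flatten))

-- ===== PRECONDITION & SPEC =====
def Spec_sorting_sentence (s : String) (out : String) : Prop := out = sorting_sentence_alt s
instance (s : String) (out : String) : Decidable (Spec_sorting_sentence s out) := by unfold Spec_sorting_sentence; infer_instance

-- ===== CLAIM (what is proved, stated in full; the proofs are below) =====
def Claim_equal_sorting_sentence : Prop := ∀ (s : String), Dom_sorting_sentence s → Spec_sorting_sentence s (sorting_sentence s)

-- ===== LEMMAS AND PROOFS =====

-- the (digit, de-digited word) pairs contributed by the indices in L of the word w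
def pvIdxPairs (w : List Char) (L : List Nat) : List (Int × List Char) :=
  L.flatMap (fun i =>
    if PySem.Chars.isdigit (w.getD i ' ') then
      [(((w.getD i ' ').toNat : Int) - 48, w.take i ++ w.drop (i + 1))]
    else [])

def pvAllPairs (ws : List String) : List (Int × List Char) :=
  ws.flatMap (fun word => pvIdxPairs word.toList (List.range word.toList.length))

theorem pv_isdigit_bounds (c : Char) (h : PySem.Chars.isdigit c = true) :
    48 ≤ c.toNat ∧ c.toNat ≤ 57 := by
  simp [PySem.Chars.isdigit, Char.le_def] at h
  constructor <;> [exact h.1; exact h.2]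

theorem pv_keys_range (w : List Char) (L : List Nat) :
    ∀ p ∈ pvIdxPairs w L, ∃ d : Nat, d < 10 ∧ p.1 = (d : Int) := by
  intro p hp
  simp only [pvIdxPairs, List.mem_flatMap] at hp
  obtain ⟨i, _, hp⟩ := hp
  by_cases hd : PySem.Chars.isdigit (w.getD i ' ') = true
  · rw [if_pos hd] at hp
    simp only [List.mem_singleton] at hp
    obtain ⟨h1, h2⟩ := pv_isdigit_bounds _ hd
    exact ⟨(w.getD i ' ').toNat - 48, by omega, by rw [hp]; push_cast; omega⟩
  · rw [if_neg hd] at hp; simp at hp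

theorem pv_allPairs_range (ws : List String) :
    ∀ p ∈ pvAllPairs ws, ∃ d : Nat, d < 10 ∧ p.1 = (d : Int) := by
  intro p hp
  simp only [pvAllPairs, List.mem_flatMap] at hp
  obtain ⟨w, _, hp⟩ := hp
  exact pv_keys_range _ _ p hp

-- ===== A's collection loops =====

theorem pv_A_inner_aux (w : List Char) (L : List Nat) (hL : ∀ i ∈ L, i < w.length) :
    ∀ ks vs, L.foldl (fun acc (i : Nat) => pvA_step w acc (i : Int)) (ks, vs)
      = (ks ++ (pvIdxPairs w L).map Prod.fst, vs ++ (pvIdxPairs w L).map Prod.snd) := by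
  induction L with
  | nil => intro ks vs; simp [pvIdxPairs]
  | cons i L ih =>
    intro ks vs
    have hi : i < w.length := hL i (by simp)
    have hstep : pvA_step w (ks, vs) (i : Int)
        = (ks ++ (pvIdxPairs w [i]).map Prod.fst, vs ++ (pvIdxPairs w [i]).map Prod.snd) := by
      rw [pvA_step, PySem.List.pyGet?_natCast, List.getElem?_eq_getElem hi]
      dsimp only
      simp only [pvIdxPairs, List.flatMap_cons, List.flatMap_nil, List.append_nil,
        List.getD_eq_getElem w ' ' hi]
      by_cases hd : PySem.Chars.isdigit w[i] = true
      · rw [if_pos hd, if_pos hd]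
        rw [PySem.Chars.slice, PySem.List.slice_to w (by positivity),
          PySem.Chars.slice, PySem.List.slice_from w (by positivity)]
        have h1 : ((i : Int)).toNat = i := Int.toNat_natCast i
        have h2 : ((i : Int) + 1).toNat = i + 1 := by omega
        rw [h1, h2]
        simp
      · rw [if_neg hd, if_neg hd]; simp
    have hsplit : pvIdxPairs w (i :: L) = pvIdxPairs w [i] ++ pvIdxPairs w L := by
      simp [pvIdxPairs]
    rw [List.foldl_cons, hstep, ih (fun j hj => hL j (by simp [hj])), hsplit]
    simp [List.append_assoc]

theorem pv_A_words (ws : List String) :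
    ∀ ks vs, ws.foldl
        (fun acc word =>
          (PySem.List.pyRange 0 ((word.toList.length : Nat) : Int) 1).foldl (pvA_step word.toList) acc)
        (ks, vs)
      = (ks ++ (pvAllPairs ws).map Prod.fst, vs ++ (pvAllPairs ws).map Prod.snd) := by
  induction ws with
  | nil => intro ks vs; simp [pvAllPairs]
  | cons w ws ih =>
    intro ks vs
    rw [List.foldl_cons, PySem.List.pyRange_zero_natCast, List.foldl_map,
      pv_A_inner_aux w.toList _ (fun i hi => List.mem_range.mp hi) ks vs, ih]
    simp [pvAllPairs, List.append_assoc]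

-- ===== B's bucket loops =====

theorem pv_B_inner_aux (w : List Char) (L : List Nat) (hL : ∀ i ∈ L, i < w.length) :
    ∀ bk : List (List (List Char)), bk.length = 10 →
      (L.foldl (fun bk' (i : Nat) => pvB_step w bk' (i : Int)) bk).length = 10 ∧
      ∀ d : Nat, d < 10 →
        (L.foldl (fun bk' (i : Nat) => pvB_step w bk' (i : Int)) bk).getD d []
          = bk.getD d [] ++ ((pvIdxPairs w L).filter (fun p => decide (p.1 = (d : Int)))).map Prod.snd := by
  induction L with
  | nil => intro bk hbk; exact ⟨hbk, fun d _ => by simp [pvIdxPairs]⟩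
  | cons i L ih =>
    intro bk hbk
    have hi : i < w.length := hL i (by simp)
    have hL' : ∀ j ∈ L, j < w.length := fun j hj => hL j (by simp [hj])
    by_cases hd : PySem.Chars.isdigit (w.getD i ' ') = true
    · -- digit at index i: one element goes into bucket d₀
      obtain ⟨h48, h57⟩ := pv_isdigit_bounds _ hd
      set c := w.getD i ' ' with hc
      set d₀ := c.toNat - 48 with hd₀
      have hd₀lt : d₀ < 10 := by omega
      have hstep : pvB_step w bk (i : Int)
          = bk.set d₀ (bk.getD d₀ [] ++ [w.take i ++ w.drop (i + 1)]) := by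
        rw [pvB_step, PySem.List.pyGet?_natCast, List.getElem?_eq_getElem hi,
          ← List.getD_eq_getElem w ' ' hi, ← hc]
        dsimp only
        rw [if_pos hd]
        have h1 : ((i : Int)).toNat = i := Int.toNat_natCast i
        rw [h1]
      have hup : ∀ d : Nat, d < 10 →
          (bk.set d₀ (bk.getD d₀ [] ++ [w.take i ++ w.drop (i + 1)])).getD d []
            = bk.getD d [] ++ (if d₀ = d then [w.take i ++ w.drop (i + 1)] else []) := by
        intro d hdlt
        rw [List.getD_eq_getElem?_getD, List.getElem?_set, List.getD_eq_getElem?_getD]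
        by_cases he : d₀ = d
        · rw [if_pos he, if_pos (by omega : d₀ < bk.length), he]
          simp
        · rw [if_neg he]; simp [he]
      obtain ⟨ihlen, ihget⟩ := ih hL' (bk.set d₀ (bk.getD d₀ [] ++ [w.take i ++ w.drop (i + 1)]))
        (by rw [List.length_set]; exact hbk)
      refine ⟨by rw [List.foldl_cons, hstep]; exact ihlen, fun d hdlt => ?_⟩
      rw [List.foldl_cons, hstep, ihget d hdlt, hup d hdlt]
      have hpairs : pvIdxPairs w (i :: L)
          = ((c.toNat : Int) - 48, w.take i ++ w.drop (i + 1)) :: pvIdxPairs w L := by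
        simp only [pvIdxPairs, List.flatMap_cons, ← hc, if_pos hd, List.singleton_append]
      rw [hpairs]
      by_cases he : d₀ = d
      · rw [List.filter_cons_of_pos (by simp; omega)]
        simp [he, List.append_assoc]
      · rw [List.filter_cons_of_neg (by simp; intro hcast; apply he; omega)]
        simp [he]
    · -- not a digit: the step leaves the buckets unchanged
      have hstep : pvB_step w bk (i : Int) = bk := by
        rw [pvB_step, PySem.List.pyGet?_natCast, List.getElem?_eq_getElem hi,
          ← List.getD_eq_getElem w ' ' hi]
        dsimp only
        rw [if_neg hd]
      have hpairs : pvIdxPairs w (i :: L) = pvIdxPairs w L := by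
        simp only [pvIdxPairs, List.flatMap_cons, if_neg hd, List.nil_append]
      obtain ⟨ihlen, ihget⟩ := ih hL' bk hbk
      exact ⟨by rw [List.foldl_cons, hstep]; exact ihlen,
        fun d hdlt => by rw [List.foldl_cons, hstep, hpairs]; exact ihget d hdlt⟩

theorem pv_B_words (ws : List String) :
    ∀ bk : List (List (List Char)), bk.length = 10 →
      (ws.foldl
          (fun bk word =>
            (PySem.List.pyRange 0 ((word.toList.length : Nat) : Int) 1).foldl (pvB_step word.toList) bk)
          bk).length = 10 ∧
      ∀ d : Nat, d < 10 →
        (ws.foldl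
            (fun bk word =>
              (PySem.List.pyRange 0 ((word.toList.length : Nat) : Int) 1).foldl (pvB_step word.toList) bk)
            bk).getD d []
          = bk.getD d [] ++ ((pvAllPairs ws).filter (fun p => decide (p.1 = (d : Int)))).map Prod.snd := by
  induction ws with
  | nil => intro bk hbk; exact ⟨hbk, fun d _ => by simp [pvAllPairs]⟩
  | cons w ws ih =>
    intro bk hbk
    rw [List.foldl_cons, PySem.List.pyRange_zero_natCast, List.foldl_map]
    obtain ⟨hlen1, hget1⟩ := pv_B_inner_aux w.toList _ (fun i hi => List.mem_range.mp hi) bk hbk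
    obtain ⟨hlen2, hget2⟩ := ih _ hlen1
    refine ⟨hlen2, fun d hdlt => ?_⟩
    rw [hget2 d hdlt, hget1 d hdlt]
    simp [pvAllPairs, List.append_assoc]

-- ===== the sorting layer (A's tuple sort = B's buckets) =====

theorem pv_perm_flatMap {α β : Type} (l : List α) (f g : α → List β)
    (h : ∀ d ∈ l, (f d).Perm (g d)) : (l.flatMap f).Perm (l.flatMap g) := by
  induction l with
  | nil => simp
  | cons d l ih =>
    simp only [List.flatMap_cons]
    exact (h d (by simp)).append (ih (fun e he => h e (by simp [he])))

theorem pv_partition_perm (P : List (Int × List Char))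
    (h : ∀ p ∈ P, ∃ d : Nat, d < 10 ∧ p.1 = (d : Int)) :
    ((List.range 10).flatMap (fun (d : Nat) => P.filter (fun p => decide (p.1 = (d : Int))))).Perm P := by
  induction P with
  | nil => simp
  | cons p P ih =>
    obtain ⟨d₀, hd₀, hp1⟩ := h p (by simp)
    obtain ⟨l₁, l₂, hr⟩ := List.append_of_mem (List.mem_range.mpr hd₀)
    have hnd : (List.range 10).Nodup := List.nodup_range
    rw [hr] at hnd
    have hd1 : d₀ ∉ l₁ := fun hm => (List.disjoint_of_nodup_append hnd) hm (by simp)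
    have hd2 : d₀ ∉ l₂ := by
      have := (List.nodup_append.mp hnd).2.1
      simp at this; exact this.1
    have hstep : ∀ d : Nat, d ≠ d₀ →
        (p :: P).filter (fun q => decide (q.1 = (d : Int))) = P.filter (fun q => decide (q.1 = (d : Int))) := by
      intro d hd
      apply List.filter_cons_of_neg
      simp [hp1]
      exact_mod_cast fun hc => hd (by exact_mod_cast hc.symm)
    have hmid : (p :: P).filter (fun q => decide (q.1 = (d₀ : Int))) =
        p :: P.filter (fun q => decide (q.1 = (d₀ : Int))) :=
      List.filter_cons_of_pos (by simp [hp1])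
    have hc1 : l₁.flatMap (fun (d : Nat) => (p :: P).filter (fun q => decide (q.1 = (d : Int))))
        = l₁.flatMap (fun (d : Nat) => P.filter (fun q => decide (q.1 = (d : Int)))) :=
      List.flatMap_congr (l := l₁) (fun d hd => hstep d (fun he => hd1 (he ▸ hd)))
    have hc2 : l₂.flatMap (fun (d : Nat) => (p :: P).filter (fun q => decide (q.1 = (d : Int))))
        = l₂.flatMap (fun (d : Nat) => P.filter (fun q => decide (q.1 = (d : Int)))) :=
      List.flatMap_congr (l := l₂) (fun d hd => hstep d (fun he => hd2 (he ▸ hd)))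
    rw [hr, List.flatMap_append, List.flatMap_cons]
    rw [hmid, hc1, hc2]
    have hperm := List.perm_middle (a := p)
      (l₁ := l₁.flatMap (fun (d : Nat) => P.filter (fun q => decide (q.1 = (d : Int)))))
      (l₂ := P.filter (fun q => decide (q.1 = (d₀ : Int)))
              ++ l₂.flatMap (fun (d : Nat) => P.filter (fun q => decide (q.1 = (d : Int)))))
    refine List.Perm.trans ?_ ((hperm.trans (List.Perm.cons p ?_)))
    · simp
    · have := ih (fun q hq => h q (by simp [hq]))
      rw [hr] at this
      simpa only [List.flatMap_append, List.flatMap_cons] using this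

theorem pv_sorted_congr {α κ : Type} {i1 i2 : LT κ} {d1 : @DecidableLT κ i1} {d2 : @DecidableLT κ i2}
    (h : ∀ a b : κ, @LT.lt κ i1 a b ↔ @LT.lt κ i2 a b) (xs : List α) (key : α → κ) :
    @PySem.List.sorted α κ i1 d1 xs key false = @PySem.List.sorted α κ i2 d2 xs key false := by
  have hb : (fun a b : α => @decide _ (d1 (key a) (key b))) = (fun a b : α => @decide _ (d2 (key a) (key b))) :=
    funext fun a => funext fun b => decide_eq_decide.mpr (h _ _)
  simp only [PySem.List.sorted, Bool.false_eq_true, if_false]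
  rw [hb]

theorem pv_map_insertBy {α κ : Type} [LT κ] [DecidableLT κ] (f : α → κ) (x : α) (ys : List α) :
    (PySem.List.insertBy (fun a b => decide (f a < f b)) x ys).map f
      = PySem.List.insertBy (fun a b => decide (a < b)) (f x) (ys.map f) := by
  induction ys with
  | nil => rfl
  | cons y ys ih =>
    simp only [PySem.List.insertBy, List.map_cons]
    by_cases h : f x < f y
    · simp [h]
    · simp [h, ih]

theorem pv_map_sorted {α κ : Type} [LT κ] [DecidableLT κ] (f : α → κ) (xs : List α) :
    (PySem.List.sorted xs (fun x => f x) false).map f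
      = PySem.List.sorted (xs.map f) (fun v => v) false := by
  simp only [PySem.List.sorted, Bool.false_eq_true, if_false]
  induction xs using List.reverseRecOn with
  | nil => rfl
  | append_singleton xs x ih =>
    simp only [List.foldl_append, List.foldl_cons, List.foldl_nil, List.map_append,
      List.map_cons, List.map_nil]
    rw [pv_map_insertBy, ih]

theorem pv_sorted2_eq_sorted_lex (xs : List (Int × List Char)) :
    PySem.List.sorted2 xs (fun p => p.1) (fun p => p.2) false
      = PySem.List.sorted xs (fun p => toLex p) false := by
  simp only [PySem.List.sorted2, PySem.List.sorted, Bool.false_eq_true, if_false]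
  have hb : (fun a b : Int × List Char =>
        (decide (a.1 < b.1) || (!decide (b.1 < a.1) && decide (a.2 < b.2))))
      = (fun a b : Int × List Char => decide (toLex a < toLex b)) := by
    funext a b
    rcases lt_trichotomy a.1 b.1 with h | h | h
    · simp [h, Prod.Lex.lt_iff, not_lt.mpr (le_of_lt h)]
    · simp [h, Prod.Lex.lt_iff]
    · simp [h, not_lt.mpr (le_of_lt h), Prod.Lex.lt_iff, ne_of_gt h]
  rw [hb]

theorem pv_sortedM_eq_sorted (b : List (List Char)) :
    @PySem.List.sorted _ _ List.instLinearOrder.toLT (@LinearOrder.toDecidableLT (List Char) _)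
        b (fun v => v) false
      = PySem.List.sorted b (fun v => v) false :=
  pv_sorted_congr (fun x y =>
    ⟨fun hh => (List.lt_iff_lex_lt x y).mpr hh, fun hh => (List.lt_iff_lex_lt x y).mp hh⟩) b _

theorem pv_sorted_lex_buckets (P : List (Int × List Char))
    (h : ∀ p ∈ P, ∃ d : Nat, d < 10 ∧ p.1 = (d : Int)) :
    PySem.List.sorted P (fun p => toLex p) false
      = (List.range 10).flatMap (fun (d : Nat) =>
          @PySem.List.sorted _ _ List.instLinearOrder.toLT (@LinearOrder.toDecidableLT (List Char) _)
            (P.filter (fun p => decide (p.1 = (d : Int)))) (fun p => p.2) false) := by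
  apply PySem.List.eq_of_perm_of_pairwise_le_of_injective (key := fun p : Int × List Char => toLex p)
    (fun a b hh => hh)
  · exact (PySem.List.sorted_perm ..).trans ((pv_partition_perm P h).symm.trans
      (pv_perm_flatMap _ _ _ (fun d _ =>
        (@PySem.List.sorted_perm _ _ List.instLinearOrder.toLT
          (@LinearOrder.toDecidableLT (List Char) _) _ _ _).symm)))
  · exact PySem.List.sorted_pairwise P (fun p => toLex p)
  · rw [List.pairwise_flatMap]
    constructor
    · intro d _
      have hs : List.Pairwise (fun a b : Int × List Char => a.2 ≤ b.2)
          (@PySem.List.sorted _ _ List.instLinearOrder.toLT (@LinearOrder.toDecidableLT (List Char) _)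
            (P.filter (fun p => decide (p.1 = (d : Int)))) (fun p => p.2) false) :=
        PySem.List.sorted_pairwise _ _
      refine hs.imp_of_mem (fun {a b} ha hb hab => ?_)
      have ha1 : a.1 = (d : Int) := by
        have := (@PySem.List.mem_sorted _ _ List.instLinearOrder.toLT
          (@LinearOrder.toDecidableLT (List Char) _) _ _ _ _).mp ha
        simpa using (List.mem_filter.mp this).2
      have hb1 : b.1 = (d : Int) := by
        have := (@PySem.List.mem_sorted _ _ List.instLinearOrder.toLT
          (@LinearOrder.toDecidableLT (List Char) _) _ _ _ _).mp hb
        simpa using (List.mem_filter.mp this).2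
      rw [Prod.Lex.le_iff]
      simp only [ofLex_toLex]
      exact Or.inr ⟨ha1.trans hb1.symm, hab⟩
    · refine List.pairwise_lt_range.imp_of_mem (fun {d₁ d₂} _ _ hlt x hx y hy => ?_)
      have hx1 : x.1 = (d₁ : Int) := by
        have := (@PySem.List.mem_sorted _ _ List.instLinearOrder.toLT
          (@LinearOrder.toDecidableLT (List Char) _) _ _ _ _).mp hx
        simpa using (List.mem_filter.mp this).2
      have hy1 : y.1 = (d₂ : Int) := by
        have := (@PySem.List.mem_sorted _ _ List.instLinearOrder.toLT
          (@LinearOrder.toDecidableLT (List Char) _) _ _ _ _).mp hy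
        simpa using (List.mem_filter.mp this).2
      rw [Prod.Lex.le_iff]
      simp only [ofLex_toLex]
      exact Or.inl (by rw [hx1, hy1]; exact_mod_cast hlt)

theorem pv_sort_layer (P : List (Int × List Char))
    (h : ∀ p ∈ P, ∃ d : Nat, d < 10 ∧ p.1 = (d : Int)) :
    (PySem.List.sorted2 P (fun p => p.1) (fun p => p.2) false).map Prod.snd
      = (((List.range 10).map (fun (d : Nat) =>
            (P.filter (fun p => decide (p.1 = (d : Int)))).map Prod.snd)).map
          (fun b => PySem.List.sorted b (fun v => v) false)).flatten := by
  rw [pv_sorted2_eq_sorted_lex, pv_sorted_lex_buckets P h, List.map_flatMap]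
  rw [List.map_map, ← List.flatMap_def]
  apply List.flatMap_congr
  intro d _
  rw [@pv_map_sorted _ _ List.instLinearOrder.toLT (@LinearOrder.toDecidableLT (List Char) _) Prod.snd _,
    pv_sortedM_eq_sorted]
  rfl

-- ===== assembly =====

theorem pv_buckets_eq (ws : List String) :
    ws.foldl
        (fun bk word =>
          (PySem.List.pyRange 0 ((word.toList.length : Nat) : Int) 1).foldl (pvB_step word.toList) bk)
        (List.replicate 10 [])
      = (List.range 10).map (fun (d : Nat) =>
          ((pvAllPairs ws).filter (fun p => decide (p.1 = (d : Int)))).map Prod.snd) := by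
  obtain ⟨hlen, hget⟩ := pv_B_words ws (List.replicate 10 []) (by simp)
  apply List.ext_getElem
  · rw [hlen]; simp
  · intro d hd1 hd2
    have hd10 : d < 10 := by rw [hlen] at hd1; exact hd1
    have h := hget d hd10
    rw [List.getD_eq_getElem _ [] hd1,
      List.getD_eq_getElem _ [] (by simpa using hd10)] at h
    rw [h, List.getElem_replicate]
    simp

-- ===== VERDICT (by name: the statement is the Claim_ definition above) =====
theorem sorting_sentence_spec : Claim_equal_sorting_sentence := by
  unfold Claim_equal_sorting_sentence Spec_sorting_sentence
  intro s _
  unfold sorting_sentence sorting_sentence_alt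
  simp only []
  rw [pv_A_words (PySem.Str.split₀ s) [] []]
  rw [pv_buckets_eq (PySem.Str.split₀ s)]
  simp only [List.nil_append]
  have hz : ((pvAllPairs (PySem.Str.split₀ s)).map Prod.fst).zip
      ((pvAllPairs (PySem.Str.split₀ s)).map Prod.snd) = pvAllPairs (PySem.Str.split₀ s) :=
    Eq.symm (List.zip_of_prod rfl rfl)
  rw [hz]
  rw [PySem.List.foldl_append_singleton_eq_map (f := Prod.snd)]
  rw [pv_sort_layer (pvAllPairs (PySem.Str.split₀ s)) (pv_allPairs_range _)]
  simp
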